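-- pv_equiv track=rewrite | github.com/husnainalix77/HusnainPythonPortfolio | Connect-Four-AI-Updated/connect_four_updated.py | allHorizontalStreak
-- ===== SOURCE A (Python) =====
-- def allHorizontalStreak(grid, mark, n):
--     'Checks if there are n marks in a row horizontally with 1 empty left or right'
--     cols = len(grid[0])
--     count = 0
--     for row in grid:
--         for r in range(cols - n + 1):
--             # Found n in a row
--             if row[r:r+n] == [mark] * n:
--                 # Check immediate right
--                 if (r + n < cols and row[r+n] == '-')\
--                     or (r - 1 >= 0 and row[r-1] == '-'):
--                     count += 1
--     return count
-- ===== SOURCE B (Python) =====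
-- def allHorizontalStreak(grid, mark, n):
--     'Checks if there are n marks in a row horizontally with 1 empty left or right'
--     cols = len(grid[0])
--     total = 0
--     for row in grid:
--         w = row[:cols]
--         run = 0
--         for i, cell in enumerate(w):
--             run = run + 1 if cell == mark else 0
--             if run >= n:
--                 # window [i-n+1, i] is all marks; check right then left neighbour
--                 if (i + 1 < cols and w[i + 1] == '-') or (i - n >= 0 and w[i - n] == '-'):
--                     total += 1
--     return total
-- ===== Notes on version B (the rewrite author's own statement) =====
-- stated objective: alternative
-- what changed: B makes one left-to-right pass per row maintaining the length of the current run of marks (sliding window), counting a window the moment the run reaches n, instead of re-comparing an n-element slice against [mark]*n at every start position.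
-- outside the precondition, e.g. on allHorizontalStreak([['-', 'x']], 'x', 0): A returns 2, B returns 1; on allHorizontalStreak([['-', '-'], ['x']], 'y', 1): A returns 0, B returns 0
import Mathlib
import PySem

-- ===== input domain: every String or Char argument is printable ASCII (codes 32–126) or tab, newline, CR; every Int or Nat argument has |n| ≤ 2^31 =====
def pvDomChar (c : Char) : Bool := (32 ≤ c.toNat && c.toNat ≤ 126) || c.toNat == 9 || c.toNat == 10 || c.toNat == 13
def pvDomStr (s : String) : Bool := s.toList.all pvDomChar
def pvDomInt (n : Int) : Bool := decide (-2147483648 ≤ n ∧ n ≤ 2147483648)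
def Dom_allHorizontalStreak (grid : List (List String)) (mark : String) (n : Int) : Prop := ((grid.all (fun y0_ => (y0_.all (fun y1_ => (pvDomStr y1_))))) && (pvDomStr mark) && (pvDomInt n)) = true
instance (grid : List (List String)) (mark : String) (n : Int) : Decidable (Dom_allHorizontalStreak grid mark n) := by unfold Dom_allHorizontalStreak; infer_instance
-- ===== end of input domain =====

-- B replaces A's per-start-position slice comparison by one sliding-window pass per row that
-- maintains the current run length of marks (a different algorithm, same result);
-- equality of return values is proved on Pre_.


-- ===== PORT A =====
-- one iteration of A's inner 'for r in range(cols - n + 1)' loop;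
-- pyGetD with default "" is exact here: Pre_ guarantees the evaluated indices are in range
def pvStepA (row : List String) (mark : String) (n cols : Int) (count r : Int) : Int :=
  if PySem.List.slice row (some r) (some (r + n)) = List.replicate n.toNat mark then
    if (r + n < cols ∧ PySem.List.pyGetD row (r + n) "" = "-") ∨
       (r - 1 ≥ 0 ∧ PySem.List.pyGetD row (r - 1) "" = "-") then count + 1 else count
  else count

def allHorizontalStreak (grid : List (List String)) (mark : String) (n : Int) : Int :=
  -- cols = len(grid[0]); the empty grid (Python IndexError) is excluded by Pre_
  let cols : Int := (grid.headI.length : Int)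
  grid.foldl (fun count row =>
    (PySem.List.pyRange 0 (cols - n + 1) 1).foldl (pvStepA row mark n cols) count) 0

-- ===== PORT B =====
-- B's inner loop 'for i, cell in enumerate(w)' carrying the state (run, total);
-- pyGetD with default "" is exact here: Pre_ guarantees the evaluated indices are in range
def pvGoB (w : List String) (mark : String) (n cols : Int) :
    List (Int × String) → Int → Int → Int
  | [], _, total => total
  | (i, cell) :: rest, run, total =>
    let run' := if cell = mark then run + 1 else 0
    let total' := if run' ≥ n ∧ ((i + 1 < cols ∧ PySem.List.pyGetD w (i + 1) "" = "-") ∨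
        (i - n ≥ 0 ∧ PySem.List.pyGetD w (i - n) "" = "-")) then total + 1 else total
    pvGoB w mark n cols rest run' total'

def allHorizontalStreak_alt (grid : List (List String)) (mark : String) (n : Int) : Int :=
  let cols : Int := (grid.headI.length : Int)
  grid.foldl (fun total row =>
    let w := PySem.List.slice row none (some cols)   -- w = row[:cols]
    pvGoB w mark n cols (PySem.List.enumerate w 0) 0 total) 0

-- ===== PRECONDITION & SPEC =====
-- Pre_ excludes the empty grid and ragged rows shorter than the first row (on such inputs A can
-- raise IndexError) and n ≤ 0 (for n < 0 A always raises IndexError; for n = 0 A's count of empty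
-- windows, including one past the right edge of the row, is an artefact of its implementation).
def Pre_allHorizontalStreak (grid : List (List String)) (mark : String) (n : Int) : Prop :=
  grid ≠ [] ∧ 1 ≤ n ∧ ∀ row ∈ grid, grid.headI.length ≤ row.length
instance (grid : List (List String)) (mark : String) (n : Int) : Decidable (Pre_allHorizontalStreak grid mark n) := by unfold Pre_allHorizontalStreak; infer_instance

def pvWitness_allHorizontalStreak : List (List String) × String × Int := ([["x", "x", "-"]], "x", 2)

def Spec_allHorizontalStreak (grid : List (List String)) (mark : String) (n : Int) (out : Int) : Prop := out = allHorizontalStreak_alt grid mark n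
instance (grid : List (List String)) (mark : String) (n : Int) (out : Int) : Decidable (Spec_allHorizontalStreak grid mark n out) := by unfold Spec_allHorizontalStreak; infer_instance

-- ===== CLAIM (what is proved, stated in full; the proofs are below) =====
def Claim_equal_allHorizontalStreak : Prop := ∀ (grid : List (List String)) (mark : String) (n : Int), Dom_allHorizontalStreak grid mark n → Pre_allHorizontalStreak grid mark n → Spec_allHorizontalStreak grid mark n (allHorizontalStreak grid mark n)

-- ===== LEMMAS AND PROOFS =====

abbrev pvWin (w : List String) (mark : String) (nn r : Nat) : Prop :=
  (w.drop r).take nn = List.replicate nn mark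

abbrev pvAdj (w : List String) (nn r : Nat) : Prop :=
  (r + nn < w.length ∧ w.getD (r + nn) "" = "-") ∨ (1 ≤ r ∧ w.getD (r - 1) "" = "-")

def pvP (w : List String) (mark : String) (nn : Nat) (r : Nat) : Bool :=
  decide (pvWin w mark nn r ∧ pvAdj w nn r)

def pvRun (w : List String) (mark : String) : Nat → Nat
  | 0 => 0
  | i + 1 => if w.getD i "" = mark then pvRun w mark i + 1 else 0

def pvQ (w : List String) (mark : String) (nn : Nat) (idx : Nat) : Bool :=
  decide (nn ≤ pvRun w mark (idx + 1) ∧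
    ((idx + 1 < w.length ∧ w.getD (idx + 1) "" = "-") ∨ (nn ≤ idx ∧ w.getD (idx - nn) "" = "-")))

theorem pvWin_succ (w : List String) (mark : String) (j k : Nat) (h : j + k < w.length) :
    pvWin w mark (k + 1) j ↔ (pvWin w mark k j ∧ w.getD (j + k) "" = mark) := by
  have hget : (w.drop j)[k]? = some w[j + k] := by
    rw [List.getElem?_drop]; exact List.getElem?_eq_getElem h
  have hgd : w.getD (j + k) "" = w[j + k] := List.getD_eq_getElem w "" h
  unfold pvWin
  rw [List.take_add_one, hget, List.replicate_succ']
  constructor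
  · intro heq
    have hlen : ((w.drop j).take k).length = (List.replicate k mark).length := by
      simp [List.length_take, List.length_drop]; omega
    obtain ⟨h1, h2⟩ := List.append_inj heq hlen
    simp only [Option.toList_some, List.cons.injEq] at h2
    exact ⟨h1, by rw [hgd, h2.1]⟩
  · rintro ⟨h1, h2⟩
    rw [hgd] at h2
    simp [h1, h2]

theorem pvRun_le_iff (w : List String) (mark : String) :
    ∀ (i : Nat), i ≤ w.length → ∀ k, (k ≤ pvRun w mark i ↔ ∃ j, j + k = i ∧ pvWin w mark k j) := by
  intro i
  induction i with
  | zero =>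
    intro _ k
    constructor
    · intro hk
      have : k = 0 := by simpa [pvRun] using hk
      subst this
      exact ⟨0, by simp [pvWin]⟩
    · rintro ⟨j, hj, -⟩
      have : k = 0 := by omega
      simp [this]
  | succ i ih =>
    intro hi k
    have hi' : i ≤ w.length := by omega
    have hiw : i < w.length := by omega
    by_cases hw : w.getD i "" = mark
    · have hr : pvRun w mark (i + 1) = pvRun w mark i + 1 := by
        simp only [pvRun]; rw [if_pos hw]
      rw [hr]
      cases k with
      | zero =>
        simp only [Nat.zero_le, true_iff]
        exact ⟨i + 1, by simp [pvWin]⟩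
      | succ k' =>
        constructor
        · intro hk
          obtain ⟨j, hj, hwin⟩ := (ih hi' k').mp (by omega)
          refine ⟨j, by omega, ?_⟩
          rw [pvWin_succ w mark j k' (by omega)]
          exact ⟨hwin, by rwa [show j + k' = i by omega]⟩
        · rintro ⟨j, hj, hwin⟩
          rw [pvWin_succ w mark j k' (by omega)] at hwin
          have := (ih hi' k').mpr ⟨j, by omega, hwin.1⟩
          omega
    · have hr : pvRun w mark (i + 1) = 0 := by
        simp only [pvRun]; rw [if_neg hw]
      rw [hr]
      cases k with
      | zero =>
        simp only [Nat.le_refl, true_iff]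
        exact ⟨i + 1, by simp [pvWin]⟩
      | succ k' =>
        constructor
        · intro hk; omega
        · rintro ⟨j, hj, hwin⟩
          exfalso
          rw [pvWin_succ w mark j k' (by omega)] at hwin
          exact hw (by rw [show j + k' = i by omega] at hwin; exact hwin.2)

theorem pvRun_le_self (w : List String) (mark : String) : ∀ i, pvRun w mark i ≤ i := by
  intro i
  induction i with
  | zero => simp [pvRun]
  | succ i ih => simp only [pvRun]; split <;> omega

theorem pvGoB_inv (w : List String) (mark : String) (nn : Nat) :
    ∀ (k i : Nat), i + k = w.length → ∀ (total : Int),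
      pvGoB w mark (nn : Int) ((w.length : Nat) : Int) (PySem.List.enumerate (w.drop i) (i : Int))
        ((pvRun w mark i : Nat) : Int) total
      = total + ((List.range' i k).countP (pvQ w mark nn) : Int) := by
  intro k
  induction k with
  | zero =>
    intro i hi total
    have hd : w.drop i = [] := by
      apply List.drop_eq_nil_of_le; omega
    simp [hd, PySem.List.enumerate_nil, pvGoB]
  | succ k ih =>
    intro i hi total
    have hiw : i < w.length := by omega
    have hdrop : w.drop i = w[i] :: w.drop (i + 1) := List.drop_eq_getElem_cons hiw
    rw [hdrop, PySem.List.enumerate_cons]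
    simp only [pvGoB]
    have hgd : w.getD i "" = w[i] := List.getD_eq_getElem w "" hiw
    have hrun : (if w[i] = mark then ((pvRun w mark i : Nat) : Int) + 1 else 0)
        = ((pvRun w mark (i + 1) : Nat) : Int) := by
      by_cases h : w[i] = mark
      · have hw' : w.getD i "" = mark := by rw [hgd]; exact h
        have he : pvRun w mark (i + 1) = pvRun w mark i + 1 := by
          simp only [pvRun]; rw [if_pos hw']
        rw [if_pos h, he]; push_cast; ring
      · have hw' : ¬ w.getD i "" = mark := by rw [hgd]; exact h
        have he : pvRun w mark (i + 1) = 0 := by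
          simp only [pvRun]; rw [if_neg hw']
        rw [if_neg h, he]; simp
    rw [hrun]
    have hcond : (((pvRun w mark (i + 1) : Nat) : Int) ≥ (nn : Int) ∧
        ((((i + 1 : Nat) : Int) < ((w.length : Nat) : Int) ∧ PySem.List.pyGetD w (((i + 1 : Nat)) : Int) "" = "-") ∨
         ((i : Int) - (nn : Int) ≥ 0 ∧ PySem.List.pyGetD w ((i : Int) - (nn : Int)) "" = "-")))
        ↔ pvQ w mark nn i = true := by
      simp only [pvQ, decide_eq_true_eq]
      constructor
      · rintro ⟨h1, h2⟩
        refine ⟨by exact_mod_cast h1, ?_⟩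
        rcases h2 with ⟨ha, hb⟩ | ⟨ha, hb⟩
        · left
          refine ⟨by exact_mod_cast ha, ?_⟩
          rwa [PySem.List.pyGetD_natCast] at hb
        · right
          have hni : nn ≤ i := by omega
          refine ⟨hni, ?_⟩
          rw [show ((i : Int) - (nn : Int)) = (((i - nn : Nat)) : Int) by omega] at hb
          rwa [PySem.List.pyGetD_natCast] at hb
      · rintro ⟨h1, h2⟩
        refine ⟨by exact_mod_cast h1, ?_⟩
        rcases h2 with ⟨ha, hb⟩ | ⟨ha, hb⟩
        · left
          refine ⟨by exact_mod_cast ha, ?_⟩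
          rwa [PySem.List.pyGetD_natCast]
        · right
          refine ⟨by omega, ?_⟩
          rw [show ((i : Int) - (nn : Int)) = (((i - nn : Nat)) : Int) by omega]
          rwa [PySem.List.pyGetD_natCast]
    have hstep := ih (i + 1) (by omega)
    rw [show ((i : Int) + 1) = (((i + 1 : Nat)) : Int) by push_cast; ring]
    by_cases hq : pvQ w mark nn i = true
    · rw [if_pos (hcond.mpr hq), hstep, List.range'_succ, List.countP_cons, if_pos hq]
      push_cast; ring
    · rw [if_neg (fun hc => hq (hcond.mp hc)), hstep, List.range'_succ, List.countP_cons,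
        if_neg hq]
      push_cast; ring

theorem pvFoldA (row : List String) (mark : String) (nn c : Nat) (hc : c ≤ row.length)
    (hn : 1 ≤ nn) (count : Int) :
    (PySem.List.pyRange 0 ((c : Int) - (nn : Int) + 1) 1).foldl
        (pvStepA row mark (nn : Int) (c : Int)) count
    = count + ((List.range (c + 1 - nn)).countP (pvP (row.take c) mark nn) : Int) := by
  have hstep : ∀ (cnt r : Int), pvStepA row mark (nn : Int) (c : Int) cnt r =
      if (PySem.List.slice row (some r) (some (r + (nn : Int))) = List.replicate ((nn : Int)).toNat mark ∧
          ((r + (nn : Int) < (c : Int) ∧ PySem.List.pyGetD row (r + (nn : Int)) "" = "-") ∨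
           (r - 1 ≥ 0 ∧ PySem.List.pyGetD row (r - 1) "" = "-"))) then cnt + 1 else cnt := by
    intro cnt r
    unfold pvStepA
    split_ifs with h1 h2 h3 <;> tauto
  rw [PySem.List.foldl_congr_mem _ (pvStepA row mark (nn : Int) (c : Int)) _ count
    (fun acc x _ => hstep acc x)]
  rw [PySem.List.foldl_ite_add_one]
  congr 1
  rw [PySem.List.pyRange_one, List.countP_map]
  have hb : (((c : Int) - (nn : Int) + 1) - 0).toNat = c + 1 - nn := by omega
  rw [hb]
  norm_cast
  apply List.countP_congr
  intro r hr
  have hrr : r < c + 1 - nn := List.mem_range.mp hr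
  have hnc : nn ≤ c := by omega
  have hrc : r + nn ≤ c := by omega
  simp only [Function.comp_apply, pvP, decide_eq_true_eq, Nat.zero_add]
  have hslice : PySem.List.slice row (some ((r : Nat) : Int)) (some (((r : Nat) : Int) + (nn : Int)))
      = (row.drop r).take nn := PySem.List.slice_natCast_add row r nn
  have hwlen : (row.take c).length = c := by
    simp [List.length_take]; omega
  have hwin : ((row.drop r).take nn = List.replicate nn mark) ↔ pvWin (row.take c) mark nn r := by
    unfold pvWin
    rw [List.drop_take, List.take_take, min_eq_left (by omega : nn ≤ c - r)]
  have hgdt : ∀ j, j < c → (row.take c).getD j "" = row.getD j "" := by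
    intro j hj
    rw [List.getD_eq_getElem?_getD, List.getD_eq_getElem?_getD, List.getElem?_take_of_lt hj]
  constructor
  · rintro ⟨h1, h2⟩
    rw [hslice] at h1
    refine ⟨hwin.mp h1, ?_⟩
    rcases h2 with ⟨ha, hb'⟩ | ⟨ha, hb'⟩
    · left
      have hlt : r + nn < c := by exact_mod_cast (by push_cast at ha ⊢; omega : ((r + nn : Nat) : Int) < (c : Int))
      refine ⟨by omega, ?_⟩
      rw [show (((r : Nat) : Int) + (nn : Int)) = (((r + nn : Nat)) : Int) by push_cast; ring] at hb'
      rw [PySem.List.pyGetD_natCast] at hb'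
      rw [hgdt (r + nn) hlt]
      exact hb'
    · right
      have h1r : 1 ≤ r := by omega
      refine ⟨h1r, ?_⟩
      rw [show (((r : Nat) : Int) - 1) = (((r - 1 : Nat)) : Int) by omega] at hb'
      rw [PySem.List.pyGetD_natCast] at hb'
      rw [hgdt (r - 1) (by omega)]
      exact hb'
  · rintro ⟨h1, h2⟩
    rw [hslice]
    refine ⟨hwin.mpr h1, ?_⟩
    rcases h2 with ⟨ha, hb'⟩ | ⟨ha, hb'⟩
    · left
      rw [hwlen] at ha
      refine ⟨by push_cast; omega, ?_⟩
      rw [show (((r : Nat) : Int) + (nn : Int)) = (((r + nn : Nat)) : Int) by push_cast; ring]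
      rw [PySem.List.pyGetD_natCast]
      rw [hgdt (r + nn) ha] at hb'
      exact hb'
    · right
      refine ⟨by push_cast; omega, ?_⟩
      rw [show (((r : Nat) : Int) - 1) = (((r - 1 : Nat)) : Int) by omega]
      rw [PySem.List.pyGetD_natCast]
      rw [hgdt (r - 1) (by omega)] at hb'
      exact hb'

theorem pvQ_shift (w : List String) (mark : String) (nn : Nat) (hn : 1 ≤ nn) (r : Nat)
    (hr : nn + r ≤ w.length) : pvQ w mark nn (nn - 1 + r) = pvP w mark nn r := by
  simp only [pvQ, pvP]
  rw [decide_eq_decide]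
  rw [show nn - 1 + r + 1 = nn + r by omega]
  rw [show nn - 1 + r - nn = r - 1 by omega]
  have hwiniff : (nn ≤ pvRun w mark (nn + r)) ↔ pvWin w mark nn r := by
    rw [pvRun_le_iff w mark (nn + r) hr nn]
    constructor
    · rintro ⟨j, hj, hwin⟩
      rwa [show j = r by omega] at hwin
    · intro hwin
      exact ⟨r, by omega, hwin⟩
  refine and_congr hwiniff (or_congr (and_congr ?_ ?_) (and_congr ?_ Iff.rfl))
  · omega
  · rw [Nat.add_comm nn r]
  · omega

theorem pvCount_eq (w : List String) (mark : String) (nn : Nat) (hn : 1 ≤ nn) :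
    (List.range' 0 w.length).countP (pvQ w mark nn)
    = (List.range (w.length + 1 - nn)).countP (pvP w mark nn) := by
  by_cases hcase : nn ≤ w.length
  · have hsplit : List.range' 0 w.length
        = List.range' 0 (nn - 1) ++ List.range' (nn - 1) (w.length + 1 - nn) := by
      conv_lhs => rw [show w.length = (nn - 1) + (w.length + 1 - nn) by omega]
      rw [← List.range'_append]
      norm_num
    rw [hsplit, List.countP_append]
    have h0 : (List.range' 0 (nn - 1)).countP (pvQ w mark nn) = 0 := by
      rw [List.countP_eq_zero]
      intro idx hidx
      have hlt : idx < nn - 1 := by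
        have := List.mem_range'_1.mp hidx
        omega
      simp only [pvQ, decide_eq_true_eq, not_and]
      intro habs
      have := pvRun_le_self w mark (idx + 1)
      omega
    rw [h0, Nat.zero_add]
    rw [List.range'_eq_map_range, List.countP_map]
    apply List.countP_congr
    intro r hr
    have hrlt : r < w.length + 1 - nn := List.mem_range.mp hr
    have := pvQ_shift w mark nn hn r (by omega)
    simp only [Function.comp_apply, this]
  · have h1 : w.length + 1 - nn = 0 := by omega
    rw [h1]
    simp only [List.range_zero, List.countP_nil]
    rw [List.countP_eq_zero]
    intro idx hidx
    have hlt : idx < w.length := by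
      have := List.mem_range'_1.mp hidx
      omega
    simp only [pvQ, decide_eq_true_eq, not_and]
    intro habs
    have := pvRun_le_self w mark (idx + 1)
    omega

theorem allHorizontalStreak_eq (grid : List (List String)) (mark : String) (n : Int)
    (h : Pre_allHorizontalStreak grid mark n) :
    allHorizontalStreak grid mark n = allHorizontalStreak_alt grid mark n := by
  obtain ⟨hne, hn, hrows⟩ := h
  obtain ⟨nn, rfl⟩ : ∃ nn : Nat, n = (nn : Int) := ⟨n.toNat, by omega⟩
  have hnn1 : 1 ≤ nn := by exact_mod_cast hn
  simp only [allHorizontalStreak, allHorizontalStreak_alt]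
  apply PySem.List.foldl_congr_mem
  intro acc row hrow
  have hcl : grid.headI.length ≤ row.length := hrows row hrow
  rw [pvFoldA row mark nn grid.headI.length hcl hnn1 acc]
  rw [PySem.List.slice_to_natCast]
  have hwlen : (row.take grid.headI.length).length = grid.headI.length := by
    simp [List.length_take]; omega
  have hinv := pvGoB_inv (row.take grid.headI.length) mark nn
    (row.take grid.headI.length).length 0 (by omega) acc
  simp only [List.drop_zero, Nat.cast_zero] at hinv
  rw [hwlen] at hinv
  have hrun0 : pvRun (row.take grid.headI.length) mark 0 = 0 := rfl
  rw [hrun0] at hinv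
  norm_num at hinv
  rw [hinv]
  congr 1
  have := pvCount_eq (row.take grid.headI.length) mark nn hnn1
  rw [hwlen] at this
  exact_mod_cast this.symm

-- ===== VERDICT (by name: the statement is the Claim_ definition above) =====
theorem allHorizontalStreak_spec : Claim_equal_allHorizontalStreak := by
  intro grid mark n _ hpre
  unfold Spec_allHorizontalStreak
  exact allHorizontalStreak_eq grid mark n hpre
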